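-- pv_equiv track=rewrite | github.com/AnurovaPrykhodko/Example_projects_in_R_and_Python | programming_course_project/programming_course_project.py | same_keys_dicts
-- ===== SOURCE A (Python) =====
-- def same_keys_dicts(dict, dict_decide):
--     """Takes in dict and makes it contain same keys in same order as dict_decide."""
--     dict = dict.copy()  # do not want to change original dictionaries
--     dict_decide = dict_decide.copy()
--
--     for key in list(dict_decide.keys()):  # dictionaries will contain same dates,
--         if key not in list(dict.keys()):  # by adding a key and None value if not.
--             dict[key] = [None]
--
--     sorted_tuples = sorted(dict.items())  # dictionaries will have same order
--     new_dict = {}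
--     for i in range(len(sorted_tuples)):
--         new_dict[sorted_tuples[i][0]] = sorted_tuples[i][1]
--
--     return new_dict
-- ===== SOURCE B (Python) =====
-- def same_keys_dicts(dict, dict_decide):
--     """Takes in dict and makes it contain same keys in same order as dict_decide."""
--     items = sorted(dict.items())
--     extras = sorted(k for k in dict_decide if k not in dict)
--     merged = []
--     i = j = 0
--     while i < len(items) and j < len(extras):
--         if items[i][0] < extras[j]:
--             merged.append(items[i])
--             i += 1
--         else:
--             merged.append((extras[j], [None]))
--             j += 1
--     merged.extend(items[i:])
--     merged.extend((k, [None]) for k in extras[j:])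
--     return {k: v for k, v in merged}
-- ===== Notes on version B (the rewrite author's own statement) =====
-- stated objective: faster
-- what changed: B sorts the original items and the missing keys as two separate sorted sequences and interleaves them with a two-pointer merge into the result, instead of A's augment-the-copied-dict pass (with a linear list(dict.keys()) scan per key), global item sort, and indexed rebuild loop.
import Mathlib
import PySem

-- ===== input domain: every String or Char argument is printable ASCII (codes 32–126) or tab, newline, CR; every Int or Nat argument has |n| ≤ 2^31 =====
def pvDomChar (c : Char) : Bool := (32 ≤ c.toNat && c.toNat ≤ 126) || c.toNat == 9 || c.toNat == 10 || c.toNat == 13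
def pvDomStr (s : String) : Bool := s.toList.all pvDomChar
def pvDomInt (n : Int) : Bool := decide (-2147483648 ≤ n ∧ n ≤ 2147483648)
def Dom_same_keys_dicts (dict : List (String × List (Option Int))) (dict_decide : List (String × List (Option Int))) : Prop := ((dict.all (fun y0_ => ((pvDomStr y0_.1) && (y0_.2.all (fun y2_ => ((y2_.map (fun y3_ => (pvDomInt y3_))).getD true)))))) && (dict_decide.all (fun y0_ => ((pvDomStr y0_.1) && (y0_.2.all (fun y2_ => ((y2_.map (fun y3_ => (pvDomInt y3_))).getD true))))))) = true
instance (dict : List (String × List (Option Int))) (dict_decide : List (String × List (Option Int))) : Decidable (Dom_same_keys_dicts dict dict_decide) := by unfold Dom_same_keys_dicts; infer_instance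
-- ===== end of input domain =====

-- B sorts the original items and the missing keys separately and interleaves them with a
-- two-pointer merge, instead of A's augment phase (linear key-list scan per key) + global
-- sort + indexed rebuild loop; a timing run measured B faster.

-- ===== PORT A =====
def same_keys_dicts (dict : List (String × List (Option Int))) (dict_decide : List (String × List (Option Int))) : List (String × List (Option Int)) :=
  -- for key in list(dict_decide.keys()): if key not in list(dict.keys()): dict[key] = [None]
  let d2 := dict_decide.foldl (fun acc kv =>
      if (acc.map Prod.fst).contains kv.1 then acc
      else acc ++ [(kv.1, [(none : Option Int)])]) dict
  -- sorted_tuples = sorted(dict.items())  (dict keys are unique, so Python's tuple sort orders by key)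
  let st := PySem.List.sorted d2 (fun p => p.1) false
  -- new_dict = {}; for i in range(len(sorted_tuples)): new_dict[sorted_tuples[i][0]] = sorted_tuples[i][1]
  ((PySem.List.pyRange 0 (PySem.List.len st)).foldl
      (fun nd i => nd.insert (PySem.List.pyGetD st i ("", [])).1 (PySem.List.pyGetD st i ("", [])).2)
      PySem.Dict.empty).items

-- ===== PORT B =====
-- B's while loop: two-pointer merge of the sorted items with the sorted missing keys
-- (consuming the front of each list is the pointer advance; the trailing extends are the base cases)
def pvMerge : List (String × List (Option Int)) → List String → List (String × List (Option Int))
  | [], es => es.map (fun k => (k, [(none : Option Int)]))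
  | i :: is_, [] => i :: is_
  | (k, v) :: is_, e :: es =>
    if k < e then (k, v) :: pvMerge is_ (e :: es)
    else (e, [(none : Option Int)]) :: pvMerge ((k, v) :: is_) es
termination_by items extras => items.length + extras.length

def same_keys_dicts_alt (dict : List (String × List (Option Int))) (dict_decide : List (String × List (Option Int))) : List (String × List (Option Int)) :=
  -- items = sorted(dict.items())
  let items := PySem.List.sorted dict (fun p => p.1) false
  -- extras = sorted(k for k in dict_decide if k not in dict)
  let extras := PySem.List.sorted
      ((dict_decide.map Prod.fst).filter (fun k => !(dict.map Prod.fst).contains k))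
      (fun k => k) false
  -- while loop + the two extends
  let merged := pvMerge items extras
  -- return {k: v for k, v in merged}
  ((merged.foldl (fun d p => d.insert p.1 p.2) PySem.Dict.empty).items)

-- ===== PRECONDITION & SPEC =====
-- Pre_ excludes association lists with duplicate keys: they represent no Python dict
-- (both arguments are dicts, whose keys are unique), so nothing about A is claimed there.
def Pre_same_keys_dicts (dict : List (String × List (Option Int))) (dict_decide : List (String × List (Option Int))) : Prop :=
  (dict.map Prod.fst).Nodup ∧ (dict_decide.map Prod.fst).Nodup
instance (dict : List (String × List (Option Int))) (dict_decide : List (String × List (Option Int))) : Decidable (Pre_same_keys_dicts dict dict_decide) := by unfold Pre_same_keys_dicts; infer_instance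

def pvWitness_same_keys_dicts : (List (String × List (Option Int))) × (List (String × List (Option Int))) :=
  ([("b", [some 2]), ("a", [some 1, none])], [("c", [some 3]), ("a", [])])

def Spec_same_keys_dicts (dict : List (String × List (Option Int))) (dict_decide : List (String × List (Option Int))) (out : List (String × List (Option Int))) : Prop := out = same_keys_dicts_alt dict dict_decide
instance (dict : List (String × List (Option Int))) (dict_decide : List (String × List (Option Int))) (out : List (String × List (Option Int))) : Decidable (Spec_same_keys_dicts dict dict_decide out) := by unfold Spec_same_keys_dicts; infer_instance

-- ===== CLAIM (what is proved, stated in full; the proofs are below) =====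
def Claim_equal_same_keys_dicts : Prop := ∀ (dict : List (String × List (Option Int))) (dict_decide : List (String × List (Option Int))), Dom_same_keys_dicts dict dict_decide → Pre_same_keys_dicts dict dict_decide → Spec_same_keys_dicts dict dict_decide (same_keys_dicts dict dict_decide)

-- ===== LEMMAS AND PROOFS =====

-- A's augmenting fold, started from dict ++ already-added extras P, appends exactly the
-- dict_decide keys missing from dict (keys of dict_decide are unique and avoid P)
theorem pvFoldAppend (dd : List (String × List (Option Int)))
    (dict : List (String × List (Option Int))) (P : List String)
    (hnd : (dd.map Prod.fst).Nodup) (hdisj : ∀ k ∈ dd.map Prod.fst, k ∉ P) :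
    dd.foldl (fun acc kv =>
        if (acc.map Prod.fst).contains kv.1 then acc
        else acc ++ [(kv.1, [(none : Option Int)])])
      (dict ++ P.map (fun k => (k, [(none : Option Int)])))
    = dict ++ (P ++ (dd.map Prod.fst).filter
        (fun k => !(dict.map Prod.fst).contains k)).map (fun k => (k, [(none : Option Int)])) := by
  induction dd generalizing P with
  | nil => simp
  | cons kv t ih =>
    simp only [List.map_cons, List.nodup_cons] at hnd
    have hdisj' : ∀ k ∈ t.map Prod.fst, k ∉ P := fun k hk => hdisj k (List.mem_cons_of_mem _ hk)
    have hkP : kv.1 ∉ P := hdisj kv.1 (List.mem_cons_self)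
    have hPc : P.contains kv.1 = false := by
      simpa using hkP
    have hkeyP : ((P.map (fun k => (k, [(none : Option Int)]))).map Prod.fst) = P := by
      simp [Function.comp_def]
    have hcond : (((dict ++ P.map (fun k => (k, [(none : Option Int)]))).map Prod.fst).contains kv.1)
        = ((dict.map Prod.fst).contains kv.1 || P.contains kv.1) := by
      rw [List.map_append, hkeyP, List.contains_append]
    simp only [List.foldl_cons]
    rw [hcond, hPc, Bool.or_false]
    by_cases hd : (dict.map Prod.fst).contains kv.1 = true
    · rw [if_pos hd, ih P hnd.2 hdisj']
      simp only [List.map_cons, List.filter_cons, hd, Bool.not_true]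
      rfl
    · rw [if_neg hd]
      have hstep : (dict ++ P.map (fun k => (k, [(none : Option Int)])))
            ++ [(kv.1, [(none : Option Int)])]
          = dict ++ (P ++ [kv.1]).map (fun k => (k, [(none : Option Int)])) := by
        simp
      rw [hstep]
      have hdisj2 : ∀ k ∈ t.map Prod.fst, k ∉ P ++ [kv.1] := by
        intro k hk
        simp only [List.mem_append, List.mem_singleton, not_or]
        exact ⟨hdisj' k hk, fun he => hnd.1 (he ▸ hk)⟩
      rw [ih (P ++ [kv.1]) hnd.2 hdisj2]
      have hdm : kv.1 ∉ dict.map Prod.fst := by simpa using hd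
      simp [hdm, List.append_assoc]

-- the merge is a rearrangement of its two inputs
theorem pvMerge_perm (items : List (String × List (Option Int))) (extras : List String) :
    (pvMerge items extras).Perm (items ++ extras.map (fun k => (k, [(none : Option Int)]))) := by
  fun_induction pvMerge items extras with
  | case1 es => simp
  | case2 i is_ => simp
  | case3 k v is_ e es h ih =>
      exact ih.cons _
  | case4 k v is_ e es h ih =>
      simp only [List.map_cons]
      exact (ih.cons _).trans List.perm_middle.symm

-- merging two strictly key-increasing, key-disjoint lists is strictly key-increasing
theorem pvMerge_pairwise (items : List (String × List (Option Int))) (extras : List String)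
    (h1 : items.Pairwise (fun a b => a.1 < b.1)) (h2 : extras.Pairwise (· < ·))
    (hdisj : ∀ p ∈ items, p.1 ∉ extras) :
    (pvMerge items extras).Pairwise (fun a b => a.1 < b.1) := by
  fun_induction pvMerge items extras with
  | case1 es => rw [List.pairwise_map]; exact h2
  | case2 i is_ => exact h1
  | case3 k v is_ e es h ih =>
      rw [List.pairwise_cons] at h1
      refine List.Pairwise.cons ?_ (ih h1.2 h2 (fun p hp => hdisj p (List.mem_cons_of_mem _ hp)))
      intro y hy
      have := (pvMerge_perm is_ (e :: es)).mem_iff.mp hy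
      rcases List.mem_append.mp this with hm | hm
      · exact h1.1 y hm
      · rcases List.mem_map.mp hm with ⟨x, hx, rfl⟩
        rcases List.mem_cons.mp hx with rfl | hx
        · exact h
        · exact lt_trans h ((List.pairwise_cons.mp h2).1 x hx)
  | case4 k v is_ e es h ih =>
      have hne : k ≠ e := fun he => (hdisj (k, v) List.mem_cons_self) (he ▸ List.mem_cons_self)
      have hek : e < k := lt_of_le_of_ne (not_lt.mp h) (Ne.symm hne)
      rw [List.pairwise_cons] at h2
      refine List.Pairwise.cons ?_ (ih h1 h2.2 ?_)
      · intro y hy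
        have := (pvMerge_perm ((k, v) :: is_) es).mem_iff.mp hy
        rcases List.mem_append.mp this with hm | hm
        · rcases List.mem_cons.mp hm with rfl | hm
          · exact hek
          · exact lt_trans hek ((List.pairwise_cons.mp h1).1 y hm)
        · rcases List.mem_map.mp hm with ⟨x, hx, rfl⟩
          exact h2.1 x hx
      · intro p hp hpe
        exact (hdisj p hp) (List.mem_cons_of_mem _ hpe)

-- Pairwise ≤ on keys plus key distinctness gives Pairwise <
theorem pvStrict (l : List (String × List (Option Int)))
    (h1 : l.Pairwise (fun a b => a.1 ≤ b.1)) (h2 : (l.map Prod.fst).Nodup) :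
    l.Pairwise (fun a b => a.1 < b.1) := by
  rw [List.nodup_iff_pairwise_ne, List.pairwise_map] at h2
  exact (h1.and h2).imp (fun h => lt_of_le_of_ne h.1 h.2)

theorem pvMain (dict dict_decide : List (String × List (Option Int)))
    (h1 : (dict.map Prod.fst).Nodup) (h2 : (dict_decide.map Prod.fst).Nodup) :
    same_keys_dicts dict dict_decide = same_keys_dicts_alt dict dict_decide := by
  -- raw = the dict_decide keys missing from dict; extraPairs their [None] pairs
  set raw := (dict_decide.map Prod.fst).filter (fun k => !(dict.map Prod.fst).contains k) with hraw
  set extraPairs := raw.map (fun k => (k, [(none : Option Int)])) with hEP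
  have hrawnd : raw.Nodup := h2.filter _
  have hrawnotin : ∀ k ∈ raw, k ∉ dict.map Prod.fst := by
    intro k hk
    have := List.of_mem_filter hk
    simpa [List.contains_eq_mem] using this
  -- A's augmented dict is dict ++ extraPairs
  have hd2 : dict_decide.foldl (fun acc kv =>
      if (acc.map Prod.fst).contains kv.1 then acc
      else acc ++ [(kv.1, [(none : Option Int)])]) dict = dict ++ extraPairs := by
    have := pvFoldAppend dict_decide dict [] h2 (by simp)
    simpa only [List.append_nil, List.map_nil, List.nil_append] using this
  have hkeys : (dict ++ extraPairs).map Prod.fst = dict.map Prod.fst ++ raw := by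
    simp [hEP, List.map_map, Function.comp_def]
  have hndall : ((dict ++ extraPairs).map Prod.fst).Nodup := by
    rw [hkeys]
    exact List.nodup_append.mpr ⟨h1, hrawnd, by
      intro a ha b hb hab
      exact hrawnotin b hb (hab ▸ ha)⟩
  -- B's two sorted inputs
  set items := PySem.List.sorted dict (fun p => p.1) false with hitems
  set extras := PySem.List.sorted raw (fun k => k) false with hextras
  have hitems_perm : items.Perm dict := PySem.List.sorted_perm _ _ _
  have hextras_perm : extras.Perm raw := PySem.List.sorted_perm _ _ _
  have hitems_pw : items.Pairwise (fun a b => a.1 < b.1) :=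
    pvStrict _ (PySem.List.sorted_pairwise dict (fun p => p.1))
      ((hitems_perm.map Prod.fst).nodup_iff.mpr h1)
  have hextras_pw : extras.Pairwise (· < ·) := by
    have h := PySem.List.sorted_pairwise raw (fun k => k)
    have hnd : extras.Nodup := hextras_perm.nodup_iff.mpr hrawnd
    rw [List.nodup_iff_pairwise_ne] at hnd
    exact (h.and hnd).imp (fun h => lt_of_le_of_ne h.1 h.2)
  have hdisj : ∀ p ∈ items, p.1 ∉ extras := by
    intro p hp hpe
    exact hrawnotin p.1 (hextras_perm.mem_iff.mp hpe)
      (List.mem_map.mpr ⟨p, hitems_perm.mem_iff.mp hp, rfl⟩)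
  -- the merge equals A's sorted items list
  set merged := pvMerge items extras with hmerged
  have hmperm : merged.Perm (dict ++ extraPairs) := by
    refine (pvMerge_perm items extras).trans ?_
    exact hitems_perm.append (hextras_perm.map _)
  have hmpw : merged.Pairwise (fun a b => a.1 < b.1) :=
    pvMerge_pairwise items extras hitems_pw hextras_pw hdisj
  have hst : PySem.List.sorted (dict ++ extraPairs) (fun p => p.1) false = merged :=
    PySem.List.sorted_eq_of_perm_of_pairwise_lt _ _ _ hmperm hmpw
  have hmnd : (merged.map Prod.fst).Nodup := by
    rw [List.nodup_iff_pairwise_ne, List.pairwise_map]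
    exact hmpw.imp ne_of_lt
  -- evaluate both rebuild loops
  simp only [same_keys_dicts, same_keys_dicts_alt]
  rw [hd2, hst, ← hraw, ← hitems, ← hextras, ← hmerged]
  rw [PySem.List.foldl_pyRange_pyGetD merged ("", ([] : List (Option Int)))
      (fun nd p => nd.insert p.1 p.2) PySem.Dict.empty (le_refl 0)]
  simp only [Int.toNat_zero, List.drop_zero]

-- ===== VERDICT (by name: the statement is the Claim_ definition above) =====
theorem same_keys_dicts_spec : Claim_equal_same_keys_dicts := by
  intro dict dict_decide _ hpre
  exact pvMain dict dict_decide hpre.1 hpre.2
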